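-- pv_equiv track=rewrite | github.com/andyccccc/reactor | bgpAttributeDetail.py | clusterlist
-- ===== SOURCE A (Python) =====
-- def clusterlist(clusterlistData,length):
-- 	clusterlistValue=''
-- 	for i in range(0,length,1):
-- 		if i%4==0:
-- 			clusterlistValue+=' '+str(int(clusterlistData[i*2:(i+1)*2],16))
-- 		else :
-- 			clusterlistValue+='.'+str(int(clusterlistData[i*2:(i+1)*2],16))
-- 	return {'clusterlist':clusterlistValue}
-- ===== SOURCE B (Python) =====
-- def clusterlist(clusterlistData, length):
--     vals = [str(int(clusterlistData[i*2:(i+1)*2], 16)) for i in range(length)]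
--     groups = ['.'.join(vals[j:j+4]) for j in range(0, len(vals), 4)]
--     value = '' if not groups else ' ' + ' '.join(groups)
--     return {'clusterlist': value}
-- ===== Notes on version B (the rewrite author's own statement) =====
-- stated objective: alternative
-- what changed: A builds the string in one flat loop choosing ' ' vs '.' by i%4 at each step; B first parses all byte values into a list, then chunks it into groups of four joined with '.', and space-joins the groups (with a leading space), a two-level grouped construction.
import Mathlib
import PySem

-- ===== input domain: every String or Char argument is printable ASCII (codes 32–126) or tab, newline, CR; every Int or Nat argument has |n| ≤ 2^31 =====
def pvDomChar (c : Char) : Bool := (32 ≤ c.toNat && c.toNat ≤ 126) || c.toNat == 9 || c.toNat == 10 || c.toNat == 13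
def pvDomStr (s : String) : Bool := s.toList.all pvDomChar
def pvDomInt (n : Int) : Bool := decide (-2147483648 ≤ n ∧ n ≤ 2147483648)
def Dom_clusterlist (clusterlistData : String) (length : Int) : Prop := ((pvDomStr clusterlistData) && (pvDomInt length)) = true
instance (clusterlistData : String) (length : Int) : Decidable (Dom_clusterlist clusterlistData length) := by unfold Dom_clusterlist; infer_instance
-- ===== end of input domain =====

-- B replaces A's flat loop (separator chosen by i%4) with parse-all, chunk into groups of 4,
-- join groups; same cost, different decomposition ("alternative").

-- shared transliteration of the expression  str(int(clusterlistData[i*2:(i+1)*2], 16))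
-- (total form: under Pre_ the parse is always `some`)
def pvVal (cs : List Char) (i : Int) : List Char :=
  PySem.Int.toChars ((PySem.Int.ofCharsBase? (PySem.List.slice cs (some (i*2)) (some ((i+1)*2))) 16).getD 0)

-- ===== PORT A =====
def clusterlist (clusterlistData : String) (length : Int) : List (String × String) :=
  let cs := clusterlistData.toList
  let clusterlistValue := (PySem.List.pyRange 0 length 1).foldl
    (fun acc i =>
      if PySem.Int.mod i 4 == 0 then acc ++ (' ' :: pvVal cs i)
      else acc ++ ('.' :: pvVal cs i)) []
  [("clusterlist", String.ofList clusterlistValue)]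

-- ===== PORT B =====
def clusterlist_alt (clusterlistData : String) (length : Int) : List (String × String) :=
  let cs := clusterlistData.toList
  let vals := (PySem.List.pyRange 0 length 1).map (fun i => pvVal cs i)
  let groups := (PySem.List.pyRange 0 (PySem.List.len vals) 4).map
    (fun j => List.intercalate ['.'] (PySem.List.slice vals (some j) (some (j + 4))))
  let value := if groups.isEmpty then ([] : List Char) else ' ' :: List.intercalate [' '] groups
  [("clusterlist", String.ofList value)]

-- ===== PRECONDITION & SPEC =====
-- Pre_: every needed slice clusterlistData[i*2:(i+1)*2] (i < length) must parse as a base-16 int;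
-- Python A raises ValueError otherwise (in particular when length asks for slices past the data,
-- which are empty: hence the bound 2*length ≤ len(data)+1).
def Pre_clusterlist (clusterlistData : String) (length : Int) : Prop :=
  2 * length ≤ PySem.List.len clusterlistData.toList + 1 ∧
  ∀ k ∈ List.range clusterlistData.toList.length, (k : Int) < length →
    (PySem.Int.ofCharsBase? (PySem.List.slice clusterlistData.toList (some ((k:Int)*2)) (some (((k:Int)+1)*2))) 16).isSome = true
instance (clusterlistData : String) (length : Int) : Decidable (Pre_clusterlist clusterlistData length) := by
  unfold Pre_clusterlist; infer_instance

def pvWitness_clusterlist : String × Int := ("0a0b0c0d0e", 5)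

def Spec_clusterlist (clusterlistData : String) (length : Int) (out : List (String × String)) : Prop := out = clusterlist_alt clusterlistData length
instance (clusterlistData : String) (length : Int) (out : List (String × String)) : Decidable (Spec_clusterlist clusterlistData length out) := by unfold Spec_clusterlist; infer_instance

-- ===== CLAIM (what is proved, stated in full; the proofs are below) =====
def Claim_equal_clusterlist : Prop := ∀ (clusterlistData : String) (length : Int), Dom_clusterlist clusterlistData length → Pre_clusterlist clusterlistData length → Spec_clusterlist clusterlistData length (clusterlist clusterlistData length)

-- ===== LEMMAS AND PROOFS =====

-- A's loop, restated structurally: each element of the list gets a separator chosen by its position mod 4.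
def withSeps : List (List Char) → Nat → List Char
  | [], _ => []
  | v :: vs, k => ((if k % 4 == 0 then ' ' else '.') :: v) ++ withSeps vs (k+1)

theorem withSeps_append_singleton (v : List Char) :
    ∀ (vs : List (List Char)) (k : Nat),
      withSeps (vs ++ [v]) k = withSeps vs k ++ ((if (k + vs.length) % 4 == 0 then ' ' else '.') :: v) := by
  intro vs
  induction vs with
  | nil => intro k; simp [withSeps]
  | cons w vs ih =>
      intro k
      simp only [List.cons_append, withSeps, ih (k+1), List.length_cons, List.append_assoc]
      have : k + 1 + vs.length = k + (vs.length + 1) := by omega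
      rw [this]
      rfl

theorem withSeps_period : ∀ (vs : List (List Char)) (k : Nat), withSeps vs (k + 4) = withSeps vs k := by
  intro vs
  induction vs with
  | nil => intro k; rfl
  | cons v vs ih =>
      intro k
      simp only [withSeps, Nat.add_mod_right]
      have : k + 4 + 1 = (k + 1) + 4 := by omega
      rw [this, ih]

theorem withSeps_peel (vs : List (List Char)) (h : vs ≠ []) :
    withSeps vs 0 = (' ' :: List.intercalate ['.'] (vs.take 4)) ++ withSeps (vs.drop 4) 0 := by
  match vs with
  | [] => exact absurd rfl h
  | [v0] => simp [withSeps, List.intercalate]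
  | [v0, v1] => simp [withSeps, List.intercalate]
  | [v0, v1, v2] => simp [withSeps, List.intercalate]
  | v0 :: v1 :: v2 :: v3 :: rest =>
      have hp : withSeps rest 4 = withSeps rest 0 := by
        simpa using withSeps_period rest 0
      simp [withSeps, List.intercalate, hp]

theorem grouped (vs : List (List Char)) :
    withSeps vs 0
      = (List.range ((vs.length + 3) / 4)).flatMap
          (fun c => ' ' :: List.intercalate ['.'] ((vs.drop (4*c)).take 4)) := by
  induction hn : vs.length using Nat.strong_induction_on generalizing vs with
  | _ n ih =>
    subst hn
    cases vs with
    | nil => simp [withSeps]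
    | cons v rest =>
      have hne : (v :: rest) ≠ [] := by simp
      have hcnt : ((v :: rest).length + 3) / 4 = (((v :: rest).drop 4).length + 3) / 4 + 1 := by
        simp only [List.length_drop, List.length_cons]; omega
      rw [withSeps_peel _ hne, hcnt, List.range_succ_eq_map]
      simp only [List.flatMap_cons, Nat.mul_zero, List.drop_zero, List.flatMap_map]
      congr 1
      have hrec := ih ((v :: rest).drop 4).length (by simp) ((v :: rest).drop 4) rfl
      rw [hrec]
      apply List.flatMap_congr
      intro c _
      have hd : List.drop (4*(c+1)) (v :: rest) = List.drop (3 + 4*c) rest := by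
        rw [show 4*(c+1) = (3+4*c)+1 by omega]
        exact List.drop_succ_cons ..
      simp [Nat.succ_eq_add_one, hd]

theorem A_fold (f : Int → List Char) :
    ∀ (n : Nat) (acc : List Char),
      (List.range n).foldl
        (fun (acc : List Char) (k : Nat) =>
          if PySem.Int.mod (k:Int) 4 == 0 then acc ++ (' ' :: f (k:Int))
          else acc ++ ('.' :: f (k:Int))) acc
      = acc ++ withSeps ((List.range n).map (fun (k : Nat) => f (k:Int))) 0 := by
  intro n
  induction n with
  | zero => intro acc; simp [withSeps]
  | succ n ih =>
      intro acc
      rw [List.range_succ, List.foldl_append, ih, List.map_append]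
      simp only [List.map_cons, List.map_nil, List.foldl_cons, List.foldl_nil]
      rw [withSeps_append_singleton]
      have hm : PySem.Int.mod (n:Int) 4 = ((n % 4 : Nat) : Int) := by
        exact_mod_cast PySem.Int.mod_natCast n 4
      by_cases h4 : n % 4 = 0 <;>
        simp [h4, List.append_assoc] <;>
        omega

theorem joinflat : ∀ (gs : List (List Char)),
    (if gs.isEmpty then ([] : List Char) else ' ' :: List.intercalate [' '] gs)
      = gs.flatMap (fun g => ' ' :: g) := by
  intro gs
  induction gs with
  | nil => simp
  | cons g gs ih =>
      cases gs with
      | nil => simp [List.intercalate]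
      | cons g2 t =>
          simp only [List.isEmpty_cons, Bool.false_eq_true, if_false, List.flatMap_cons] at ih ⊢
          rw [← ih]
          simp [List.intercalate]

theorem pyRange4 (n : Nat) :
    PySem.List.pyRange 0 (n:Int) 4 = (List.range ((n+3)/4)).map (fun c => ((4*c : Nat) : Int)) := by
  rw [PySem.List.pyRange_of_pos 0 (n:Int) (by norm_num)]
  have hif : (if (0:Int) < (n:Int) then (((n:Int) - 0 + 4 - 1) / 4).toNat else 0) = (n+3)/4 := by
    split <;> omega
  rw [hif]
  apply List.map_congr_left
  intro c _
  push_cast; ring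

-- ===== VERDICT (by name: the statement is the Claim_ definition above) =====
theorem clusterlist_spec : Claim_equal_clusterlist := by
  intro cd length _dom _pre
  unfold Spec_clusterlist clusterlist clusterlist_alt
  simp only []
  by_cases hl : 0 ≤ length
  · obtain ⟨n, rfl⟩ : ∃ n : Nat, length = (n:Int) := ⟨length.toNat, (Int.toNat_of_nonneg hl).symm⟩
    rw [PySem.List.pyRange_zero_natCast]
    rw [List.foldl_map, A_fold (fun i => pvVal cd.toList i) n []]
    rw [List.map_map]
    simp only [Function.comp_def]
    set vals0 : List (List Char) := (List.range n).map (fun (k : Nat) => pvVal cd.toList (k:Int)) with hv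
    have hlen : vals0.length = n := by simp [hv]
    rw [PySem.List.len_eq, hlen, pyRange4, List.map_map]
    rw [joinflat, List.flatMap_map]
    rw [List.nil_append, grouped vals0, hlen]
    congr 3
    apply List.flatMap_congr
    intro c _
    simp only [Function.comp_def]
    congr 1
    rw [show ((4*c : Nat) : Int) + 4 = ((4*c : Nat) : Int) + ((4:Nat):Int) from by norm_num]
    rw [PySem.List.slice_natCast_add]
  · have hneg : PySem.List.pyRange 0 length 1 = [] := by
      rw [PySem.List.pyRange_of_pos 0 length (by norm_num)]
      rw [if_neg (by omega)]
      simp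
    rw [hneg]
    have h0 : PySem.List.pyRange 0 0 4 = [] := by simpa using pyRange4 0
    simp [PySem.List.len_eq, h0]
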